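-- pv_equiv track=rewrite | github.com/ECD5A/EllipticZero | app/tools/smart_contract_utils.py | _looks_sensitive_authority_function
-- ===== SOURCE A (Python) =====
-- def _looks_sensitive_authority_function(name: str, body: str) -> bool:
--     lowered_name = name.lower()
--     lowered_body = body.lower()
--     if any(
--         token in lowered_name
--         for token in (
--             "setowner",
--             "setadmin",
--             "setoperator",
--             "setguardian",
--             "grantrole",
--             "revokerole",
--             "pause",
--             "unpause",
--             "mint",
--             "burn",
--             "upgrade",
--             "skim",
--             "collectfee",
--             "setreservefactor",
--             "writeoff",
--         )
--     ):
--         return True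
--     return any(
--         token in lowered_body
--         for token in (
--             "owner =",
--             "admin =",
--             "operator =",
--             "guardian =",
--             "_grantrole(",
--             "_revokerole(",
--             "_setroleadmin(",
--             "_pause(",
--             "_unpause(",
--             "_mint(",
--             "_burn(",
--             "protocolfee",
--             "reservefactor",
--             "baddebt",
--         )
--     )
-- ===== SOURCE B (Python) =====
-- _NAME_TOKENS = (
--     "setowner", "setadmin", "setoperator", "setguardian", "grantrole",
--     "revokerole", "pause", "unpause", "mint", "burn", "upgrade", "skim",
--     "collectfee", "setreservefactor", "writeoff",
-- )
--
-- _BODY_TOKENS = (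
--     "owner =", "admin =", "operator =", "guardian =", "_grantrole(",
--     "_revokerole(", "_setroleadmin(", "_pause(", "_unpause(", "_mint(",
--     "_burn(", "protocolfee", "reservefactor", "baddebt",
-- )
--
--
-- def _scan_hit(text, tokens):
--     # single left-to-right pass: at each position test all tokens at once
--     for i in range(len(text) + 1):
--         if text.startswith(tokens, i):
--             return True
--     return False
--
--
-- def _looks_sensitive_authority_function(name: str, body: str) -> bool:
--     if _scan_hit(name.lower(), _NAME_TOKENS):
--         return True
--     return _scan_hit(body.lower(), _BODY_TOKENS)
-- ===== Notes on version B (the rewrite author's own statement) =====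
-- stated objective: alternative
-- what changed: Replaces the per-token 'token in text' substring scans with one left-to-right position scan of each lowered field that tests all tokens at once via tuple-argument str.startswith.
import Mathlib
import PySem

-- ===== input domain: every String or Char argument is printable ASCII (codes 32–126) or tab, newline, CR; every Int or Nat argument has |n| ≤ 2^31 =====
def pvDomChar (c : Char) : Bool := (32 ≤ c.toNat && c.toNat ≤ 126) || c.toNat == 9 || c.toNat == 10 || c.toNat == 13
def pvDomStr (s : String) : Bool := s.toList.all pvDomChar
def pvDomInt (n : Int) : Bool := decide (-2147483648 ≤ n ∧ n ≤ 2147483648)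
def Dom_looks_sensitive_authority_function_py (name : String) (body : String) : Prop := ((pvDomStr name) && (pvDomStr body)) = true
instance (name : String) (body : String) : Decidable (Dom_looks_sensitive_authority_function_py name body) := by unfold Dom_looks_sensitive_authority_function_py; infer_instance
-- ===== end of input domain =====

-- B replaces A's per-token "token in text" substring scans by a single left-to-right
-- position scan that tests all tokens at once at each position (objective: alternative).


-- ===== PORT A =====
def pvNameTokens : List String :=
  ["setowner", "setadmin", "setoperator", "setguardian", "grantrole",
   "revokerole", "pause", "unpause", "mint", "burn", "upgrade", "skim",
   "collectfee", "setreservefactor", "writeoff"]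

def pvBodyTokens : List String :=
  ["owner =", "admin =", "operator =", "guardian =", "_grantrole(",
   "_revokerole(", "_setroleadmin(", "_pause(", "_unpause(", "_mint(",
   "_burn(", "protocolfee", "reservefactor", "baddebt"]

def looks_sensitive_authority_function_py (name : String) (body : String) : Bool :=
  let lowered_name := PySem.Str.lower name
  let lowered_body := PySem.Str.lower body
  if pvNameTokens.any (fun token => PySem.Str.isIn token lowered_name) then
    true
  else
    pvBodyTokens.any (fun token => PySem.Str.isIn token lowered_body)

-- ===== PORT B =====
-- _scan_hit: one pass over positions; at each position test whether some token starts there.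
-- The loop over i in range(len(text)+1) becomes structural recursion over the suffix.
def pvScanHit (tokens : List (List Char)) : List Char → Bool
  | [] => tokens.any (fun t => PySem.Chars.startswith [] t)
  | c :: rest =>
    if tokens.any (fun t => PySem.Chars.startswith (c :: rest) t) then true
    else pvScanHit tokens rest

def looks_sensitive_authority_function_py_alt (name : String) (body : String) : Bool :=
  if pvScanHit (pvNameTokens.map String.toList) (PySem.Str.lower name).toList then
    true
  else
    pvScanHit (pvBodyTokens.map String.toList) (PySem.Str.lower body).toList

-- ===== PRECONDITION & SPEC =====
def Spec_looks_sensitive_authority_function_py (name : String) (body : String) (out : Bool) : Prop := out = looks_sensitive_authority_function_py_alt name body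
instance (name : String) (body : String) (out : Bool) : Decidable (Spec_looks_sensitive_authority_function_py name body out) := by unfold Spec_looks_sensitive_authority_function_py; infer_instance

-- ===== CLAIM (what is proved, stated in full; the proofs are below) =====
def Claim_equal_looks_sensitive_authority_function_py : Prop := ∀ (name : String) (body : String), Dom_looks_sensitive_authority_function_py name body → Spec_looks_sensitive_authority_function_py name body (looks_sensitive_authority_function_py name body)

-- ===== LEMMAS AND PROOFS =====

-- the position scan finds exactly the tokens that occur as an infix
theorem pvScanHit_iff (tokens : List (List Char)) (cs : List Char) :
    pvScanHit tokens cs = true ↔ ∃ t ∈ tokens, t <:+: cs := by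
  induction cs with
  | nil =>
    simp [pvScanHit, PySem.Chars.startswith_iff, List.infix_nil, List.prefix_nil]
  | cons c rest ih =>
    simp only [pvScanHit]
    by_cases h : tokens.any (fun t => PySem.Chars.startswith (c :: rest) t) = true
    · rw [if_pos h]
      simp only [true_iff]
      rcases List.any_eq_true.mp h with ⟨t, ht, hs⟩
      exact ⟨t, ht, ((PySem.Chars.startswith_iff _ _).mp hs).isInfix⟩
    · rw [if_neg h, ih]
      constructor
      · rintro ⟨t, ht, hinf⟩; exact ⟨t, ht, hinf.trans (List.suffix_cons c rest).isInfix⟩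
      · rintro ⟨t, ht, hinf⟩
        rcases List.infix_cons_iff.mp hinf with hp | hinf'
        · exact absurd (List.any_eq_true.mpr ⟨t, ht, (PySem.Chars.startswith_iff _ _).mpr hp⟩) h
        · exact ⟨t, ht, hinf'⟩

-- the per-token substring scan equals the position scan, for any token list
theorem pvAny_isIn_eq_scanHit (tokens : List String) (s : String) :
    tokens.any (fun token => PySem.Str.isIn token s)
      = pvScanHit (tokens.map String.toList) s.toList := by
  rw [Bool.eq_iff_iff, pvScanHit_iff]
  simp only [List.any_eq_true, PySem.Str.isIn_iff_infix, List.mem_map]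
  constructor
  · rintro ⟨t, ht, hi⟩; exact ⟨t.toList, ⟨t, ht, rfl⟩, hi⟩
  · rintro ⟨_, ⟨t, ht, rfl⟩, hi⟩; exact ⟨t, ht, hi⟩

-- ===== VERDICT (by name: the statement is the Claim_ definition above) =====
theorem looks_sensitive_authority_function_py_spec : Claim_equal_looks_sensitive_authority_function_py := by
  intro name body _
  unfold Spec_looks_sensitive_authority_function_py
  simp only [looks_sensitive_authority_function_py, looks_sensitive_authority_function_py_alt,
    pvAny_isIn_eq_scanHit]
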